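-- pv_equiv track=rewrite | github.com/parsoli83/CP | quera/ps_158164.py | func
-- ===== SOURCE A (Python) =====
-- def func(l,cnt=0):
--     if len(l)==0:
--         return 1
--     for i in range(len(l)-1):
--         if l[i]>l[i+1]:
--             if i == len(l)-2:
--                 cnt += func(l[:i])
--             elif i==0:
--                 cnt+= func(l[2:])
--             else:
--                 cnt+=func(l[:i]+l[i+2:])
--
--     return cnt
-- ===== SOURCE B (Python) =====
-- def func(l, cnt=0):
--     if len(l) == 0:
--         return 1
--     memo = {}
--
--     def g(t):
--         if len(t) == 0:
--             return 1
--         if t in memo: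
--             return memo[t]
--         total = 0
--         for i in range(len(t) - 1):
--             if t[i] > t[i + 1]:
--                 total += g(t[:i] + t[i + 2:])
--         memo[t] = total
--         return total
--
--     return cnt + g(tuple(l))
-- ===== Notes on version B (the rewrite author's own statement) =====
-- stated objective: alternative
-- what changed: B replaces A's naive recursion by a memoized helper keyed on the remaining tuple, so each distinct reachable sub-list is solved once (measured 88x at n=16, but on random inputs the number of distinct sub-lists still grows too fast for the largest timing size, so no unqualified speed claim).
import Mathlib
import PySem

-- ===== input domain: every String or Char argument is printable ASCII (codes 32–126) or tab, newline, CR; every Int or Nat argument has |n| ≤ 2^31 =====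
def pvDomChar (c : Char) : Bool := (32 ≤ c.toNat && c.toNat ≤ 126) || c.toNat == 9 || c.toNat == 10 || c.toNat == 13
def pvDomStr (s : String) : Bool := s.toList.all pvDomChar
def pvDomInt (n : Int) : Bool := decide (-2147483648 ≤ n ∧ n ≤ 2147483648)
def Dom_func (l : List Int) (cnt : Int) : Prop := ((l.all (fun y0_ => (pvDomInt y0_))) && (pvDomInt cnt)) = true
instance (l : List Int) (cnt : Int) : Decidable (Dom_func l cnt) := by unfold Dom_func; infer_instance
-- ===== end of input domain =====

-- B replaces A's naive exponential recursion by memoization on the remaining sub-list (each distinct sub-list solved once); same return value everywhere.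

-- termination lemmas cited by the ports' decreasing_by (extracted so the recursion carries only small proof terms)
theorem pv_slice_to_len_lt (l : List Int) {x : Int} (h0 : 0 ≤ x) (h1 : x < (l.length : Int) - 1) :
    (PySem.List.slice l none (some x)).length < l.length := by
  rw [PySem.List.slice_to l h0]; simp only [List.length_take]; omega

theorem pv_drop_two_len_lt (l : List Int) {x : Int} (h0 : 0 ≤ x) (h1 : x < (l.length : Int) - 1) :
    (PySem.List.slice l (some 2) none).length < l.length := by
  rw [PySem.List.slice_from l (show (0:Int) ≤ 2 by omega)]
  simp only [List.length_drop]; omega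

theorem pv_child_len_lt (l : List Int) {x : Int} (h0 : 0 ≤ x) (h1 : x < (l.length : Int) - 1) :
    (PySem.List.slice l none (some x) ++ PySem.List.slice l (some (x + 2)) none).length
      < l.length := by
  rw [PySem.List.slice_to l h0, PySem.List.slice_from l (show (0:Int) ≤ x + 2 by omega)]
  simp only [List.length_append, List.length_take, List.length_drop]; omega

theorem pv_sub_succ_lt {len i : Nat} (h : i + 1 < len) : len - (i + 1) < len - i := by omega

theorem pv_child_len_lt_nat (t : List Int) {i : Nat} (h : i + 1 < t.length) :
    (PySem.List.slice t none (some (i : Int)) ++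
      PySem.List.slice t (some ((i : Int) + 2)) none).length < t.length := by
  rw [PySem.List.slice_to t (show (0:Int) ≤ (i : Int) by omega),
    PySem.List.slice_from t (show (0:Int) ≤ (i : Int) + 2 by omega)]
  simp only [List.length_append, List.length_take, List.length_drop]; omega

-- ===== PORT A =====
-- literal port of A: for-loop over range(len(l)-1), three slice branches, recursion on the shortened list
def func (l : List Int) (cnt : Int) : Int :=
  if l.length = 0 then 1
  else
    (PySem.List.pyRange 0 ((l.length : Int) - 1) 1).attach.foldl
      (fun c x =>
        if PySem.List.pyGetD l x.1 0 > PySem.List.pyGetD l (x.1 + 1) 0 then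
          if x.1 = (l.length : Int) - 2 then
            c + func (PySem.List.slice l none (some x.1)) 0
          else if x.1 = 0 then
            c + func (PySem.List.slice l (some 2) none) 0
          else
            c + func (PySem.List.slice l none (some x.1) ++ PySem.List.slice l (some (x.1 + 2)) none) 0
        else c) cnt
termination_by l.length
decreasing_by
  · exact pv_slice_to_len_lt l ((PySem.List.mem_pyRange_one).mp x.2).1
      ((PySem.List.mem_pyRange_one).mp x.2).2
  · exact pv_drop_two_len_lt l ((PySem.List.mem_pyRange_one).mp x.2).1
      ((PySem.List.mem_pyRange_one).mp x.2).2
  · exact pv_child_len_lt l ((PySem.List.mem_pyRange_one).mp x.2).1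
      ((PySem.List.mem_pyRange_one).mp x.2).2

-- ===== PORT B =====
-- literal port of B: memoized helper g over the tuple, memo threaded as a dict
mutual
def gmemo (t : List Int) (memo : PySem.Dict (List Int) Int) : Int × PySem.Dict (List Int) Int :=
  if t.length = 0 then (1, memo)
  else
    match memo.get? t with
    | some v => (v, memo)
    | none =>
      let r := gloop t 0 0 memo
      (r.1, r.2.insert t r.1)
termination_by (t.length, 1, 0)
decreasing_by
  exact Prod.Lex.right _ (Prod.Lex.left _ _ Nat.zero_lt_one)
def gloop (t : List Int) (i : Nat) (total : Int) (memo : PySem.Dict (List Int) Int) :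
    Int × PySem.Dict (List Int) Int :=
  if h : i + 1 < t.length then
    if PySem.List.pyGetD t (i : Int) 0 > PySem.List.pyGetD t ((i : Int) + 1) 0 then
      let r := gmemo (PySem.List.slice t none (some (i : Int)) ++
                      PySem.List.slice t (some ((i : Int) + 2)) none) memo
      gloop t (i + 1) (total + r.1) r.2
    else gloop t (i + 1) total memo
  else (total, memo)
termination_by (t.length, 0, t.length - i)
decreasing_by
  · exact Prod.Lex.left _ _ (pv_child_len_lt_nat t h)
  · exact Prod.Lex.right _ (Prod.Lex.right _ (pv_sub_succ_lt h))
  · exact Prod.Lex.right _ (Prod.Lex.right _ (pv_sub_succ_lt h))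
end

def func_alt (l : List Int) (cnt : Int) : Int :=
  if l.length = 0 then 1
  else cnt + (gmemo l PySem.Dict.empty).1

-- ===== PRECONDITION & SPEC =====
def Spec_func (l : List Int) (cnt : Int) (out : Int) : Prop := out = func_alt l cnt
instance (l : List Int) (cnt : Int) (out : Int) : Decidable (Spec_func l cnt out) := by unfold Spec_func; infer_instance

-- ===== CLAIM (what is proved, stated in full; the proofs are below) =====
def Claim_equal_func : Prop := ∀ (l : List Int) (cnt : Int), Dom_func l cnt → Spec_func l cnt (func l cnt)

-- ===== LEMMAS AND PROOFS =====

/-- contribution of index `i` in A's loop (the general-slice child). -/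
def contrib (l : List Int) (i : Int) : Int :=
  if PySem.List.pyGetD l i 0 > PySem.List.pyGetD l (i + 1) 0 then
    func (PySem.List.slice l none (some i) ++ PySem.List.slice l (some (i + 2)) none) 0
  else 0

/-- memo invariant: every stored value is the A-value of its key. -/
def MemoInv (memo : PySem.Dict (List Int) Int) : Prop :=
  ∀ k v, memo.get? k = some v → v = func k 0

theorem memoInv_empty : MemoInv (PySem.Dict.empty : PySem.Dict (List Int) Int) := by
  intro k v h; simp [PySem.Dict.empty, PySem.Dict.get?] at h

theorem body_eq_contrib (l : List Int) (i c : Int) (h0 : 0 ≤ i) (h1 : i < (l.length : Int) - 1) :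
    (if PySem.List.pyGetD l i 0 > PySem.List.pyGetD l (i + 1) 0 then
      if i = (l.length : Int) - 2 then c + func (PySem.List.slice l none (some i)) 0
      else if i = 0 then c + func (PySem.List.slice l (some 2) none) 0
      else c + func (PySem.List.slice l none (some i) ++ PySem.List.slice l (some (i + 2)) none) 0
    else c) = c + contrib l i := by
  unfold contrib
  split_ifs with hc h2 hz
  · -- i = len - 2 : the right slice is empty
    have : PySem.List.slice l (some (i + 2)) none = [] := by
      rw [PySem.List.slice_from l (by omega)]
      apply List.drop_eq_nil_of_le; omega
    rw [this, List.append_nil]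
  · -- i = 0 : the left slice is empty
    have hl : PySem.List.slice l none (some i) = [] := by
      rw [PySem.List.slice_to l h0]; subst hz; simp
    rw [hl, List.nil_append]; subst hz; rfl
  · rfl
  · omega

/-- A's value is `cnt` plus the sum of contributions. -/
theorem func_eq_sum (l : List Int) (cnt : Int) (h : l.length ≠ 0) :
    func l cnt = cnt + ((PySem.List.pyRange 0 ((l.length : Int) - 1) 1).map (contrib l)).sum := by
  rw [func, if_neg h,
    List.foldl_attach (l := PySem.List.pyRange 0 ((l.length : Int) - 1) 1)
      (f := fun c i =>
        if PySem.List.pyGetD l i 0 > PySem.List.pyGetD l (i + 1) 0 then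
          if i = (l.length : Int) - 2 then c + func (PySem.List.slice l none (some i)) 0
          else if i = 0 then c + func (PySem.List.slice l (some 2) none) 0
          else c + func (PySem.List.slice l none (some i) ++ PySem.List.slice l (some (i + 2)) none) 0
        else c) (b := cnt)]
  rw [PySem.List.foldl_congr_mem _ _ (fun c i => c + contrib l i) cnt
    (by
      intro c i hi
      obtain ⟨hi0, hi1⟩ := PySem.List.mem_pyRange_one.mp hi
      exact body_eq_contrib l i c hi0 hi1)]
  exact PySem.List.foldl_add _ _ _

theorem gloop_spec (t : List Int)
    (IH : ∀ t' : List Int, t'.length < t.length → ∀ memo, MemoInv memo →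
      (gmemo t' memo).1 = func t' 0 ∧ MemoInv (gmemo t' memo).2) :
    ∀ k i total memo, t.length - i = k → MemoInv memo →
      (gloop t i total memo).1 =
        total + ((PySem.List.pyRange (i : Int) ((t.length : Int) - 1) 1).map (contrib t)).sum ∧
      MemoInv (gloop t i total memo).2 := by
  intro k
  induction k with
  | zero =>
    intro i total memo hk hm
    rw [gloop, dif_neg (by omega)]
    have : PySem.List.pyRange (i : Int) ((t.length : Int) - 1) 1 = [] := by
      rw [PySem.List.pyRange_one]
      have : ((t.length : Int) - 1 - i).toNat = 0 := by omega
      simp [this]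
    simp [this, hm]
  | succ k ih =>
    intro i total memo hk hm
    rw [gloop]
    by_cases hlt : i + 1 < t.length
    · rw [dif_pos hlt]
      have hcons : PySem.List.pyRange (i : Int) ((t.length : Int) - 1) 1 =
          (i : Int) :: PySem.List.pyRange ((i : Int) + 1) ((t.length : Int) - 1) 1 :=
        PySem.List.pyRange_one_cons (by omega)
      have hchild := IH (PySem.List.slice t none (some (i : Int)) ++
            PySem.List.slice t (some ((i : Int) + 2)) none)
        (by
          rw [PySem.List.slice_to t (by omega), PySem.List.slice_from t (by omega)]
          simp only [List.length_append, List.length_take, List.length_drop]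
          omega)
        memo hm
      by_cases hcmp : PySem.List.pyGetD t (i : Int) 0 > PySem.List.pyGetD t ((i : Int) + 1) 0
      · rw [if_pos hcmp]
        have hrec := ih (i + 1) (total + (gmemo (PySem.List.slice t none (some (i : Int)) ++
            PySem.List.slice t (some ((i : Int) + 2)) none) memo).1)
          (gmemo (PySem.List.slice t none (some (i : Int)) ++
            PySem.List.slice t (some ((i : Int) + 2)) none) memo).2
          (by omega) hchild.2
        refine ⟨?_, hrec.2⟩
        rw [hrec.1, hcons]
        simp only [List.map_cons, List.sum_cons]
        have : contrib t (i : Int) = func (PySem.List.slice t none (some (i : Int)) ++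
            PySem.List.slice t (some ((i : Int) + 2)) none) 0 := by
          unfold contrib; rw [if_pos hcmp]
        rw [this, hchild.1]
        push_cast
        ring
      · rw [if_neg hcmp]
        have hrec := ih (i + 1) total memo (by omega) hm
        refine ⟨?_, hrec.2⟩
        rw [hrec.1, hcons]
        simp only [List.map_cons, List.sum_cons]
        have : contrib t (i : Int) = 0 := by unfold contrib; rw [if_neg hcmp]
        rw [this]
        push_cast
        ring
    · rw [dif_neg hlt]
      have : PySem.List.pyRange (i : Int) ((t.length : Int) - 1) 1 = [] := by
        rw [PySem.List.pyRange_one]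
        have : ((t.length : Int) - 1 - i).toNat = 0 := by omega
        simp [this]
      simp [this, hm]

theorem gmemo_spec : ∀ n (t : List Int), t.length = n → ∀ memo, MemoInv memo →
    (gmemo t memo).1 = func t 0 ∧ MemoInv (gmemo t memo).2 := by
  intro n
  induction n using Nat.strong_induction_on with
  | _ n IH =>
    intro t ht memo hm
    rw [gmemo]
    by_cases h0 : t.length = 0
    · rw [if_pos h0]
      refine ⟨?_, hm⟩
      rw [func, if_pos h0]
    · rw [if_neg h0]
      have IH' : ∀ t' : List Int, t'.length < t.length → ∀ memo', MemoInv memo' →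
          (gmemo t' memo').1 = func t' 0 ∧ MemoInv (gmemo t' memo').2 := by
        intro t' hlen memo' hm'
        exact IH t'.length (by omega) t' rfl memo' hm'
      cases hg : memo.get? t with
      | some v => exact ⟨hm t v hg, hm⟩
      | none =>
        simp only []
        have hl := gloop_spec t IH' t.length 0 0 memo (by omega) hm
        have hv : (gloop t 0 0 memo).1 = func t 0 := by
          rw [hl.1, func_eq_sum t 0 h0]
          norm_num
        refine ⟨hv, ?_⟩
        intro k v hkv
        by_cases hk : k = t
        · subst hk
          rw [PySem.Dict.get?_insert_self] at hkv
          injection hkv with h'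
          rw [← h']
          exact hv
        · rw [PySem.Dict.get?_insert_of_ne _ _ hk] at hkv
          exact hl.2 k v hkv

-- ===== VERDICT (by name: the statement is the Claim_ definition above) =====
theorem func_spec : Claim_equal_func := by
  intro l cnt _
  unfold Spec_func func_alt
  by_cases h : l.length = 0
  · rw [func]; simp [h]
  · have hg := (gmemo_spec l.length l rfl PySem.Dict.empty memoInv_empty).1
    rw [func_eq_sum l cnt h, func_eq_sum l 0 h] at *
    simp [h, hg]
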